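-- pv_equiv track=rewrite | github.com/pkoopongithub/ARS_ExplainableAI | ARSXAI9.py | _count_transitions
-- ===== SOURCE A (Python) =====
-- def _count_transitions(chains):
--     transitions = {}
--     for chain in chains:
--         for i in range(len(chain) - 1):
--             start, end = chain[i], chain[i + 1]
--             if start not in transitions:
--                 transitions[start] = {}
--             if end not in transitions[start]:
--                 transitions[start][end] = 0
--             transitions[start][end] += 1
--     return transitions
-- ===== SOURCE B (Python) =====
-- def _count_transitions(chains):
--     pairs = [(a, b) for chain in chains for a, b in zip(chain, chain[1:])]
--     counts = {}
--     for pair in pairs: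
--         counts[pair] = counts.get(pair, 0) + 1
--     transitions = {}
--     for (start, end), count in counts.items():
--         transitions.setdefault(start, {})[end] = count
--     return transitions
-- ===== Notes on version B (the rewrite author's own statement) =====
-- stated objective: alternative
-- what changed: A builds the nested transition dict incrementally with membership tests and in-place increments while scanning each chain; B first flattens all chains into one list of adjacent pairs, tallies them into a single flat counter keyed by (start, end) tuples, and then regroups that flat table into the nested dict in a second pass.
import Mathlib
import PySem

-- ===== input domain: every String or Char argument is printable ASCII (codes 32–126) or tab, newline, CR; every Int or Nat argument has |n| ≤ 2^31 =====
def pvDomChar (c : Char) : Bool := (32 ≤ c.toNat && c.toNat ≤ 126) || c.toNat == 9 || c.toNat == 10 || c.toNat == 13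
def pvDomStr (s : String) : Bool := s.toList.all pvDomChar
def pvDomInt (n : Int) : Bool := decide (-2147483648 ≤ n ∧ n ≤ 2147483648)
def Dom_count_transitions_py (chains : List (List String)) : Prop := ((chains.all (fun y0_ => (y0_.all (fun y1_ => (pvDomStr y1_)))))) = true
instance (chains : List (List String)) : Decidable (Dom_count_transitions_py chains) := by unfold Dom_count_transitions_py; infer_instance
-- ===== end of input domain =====

-- B replaces A's incremental nested-dict accumulation by a declarative comprehension over the
-- flattened pair list (ordered dedup of keys + direct counting); objective: alternative decomposition.

-- ===== PORT A =====
-- literal port of A: nested loops building a dict-of-dicts incrementally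
def count_transitions_py (chains : List (List String)) : List (String × List (String × Int)) :=
  let transitions : PySem.Dict String (PySem.Dict String Int) :=
    chains.foldl (fun transitions chain =>
      (PySem.List.pyRange 0 (PySem.List.len chain - 1)).foldl (fun transitions i =>
        let start := PySem.List.pyGetD chain i ""
        let stop := PySem.List.pyGetD chain (i + 1) ""
        let transitions :=
          if transitions.contains start then transitions
          else transitions.insert start PySem.Dict.empty
        let inner := transitions.getD start PySem.Dict.empty
        let inner := if inner.contains stop then inner else inner.insert stop 0
        let inner := inner.insert stop (inner.getD stop 0 + 1)
        transitions.insert start inner) transitions) PySem.Dict.empty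
  transitions.items.map (fun kv => (kv.1, kv.2.items))

-- ===== PORT B =====
-- literal port of Source B: flatten to pairs, tally a flat counter, regroup into the nested dict
def count_transitions_py_alt (chains : List (List String)) : List (String × List (String × Int)) :=
  let pairs := chains.flatMap (fun chain => chain.zip chain.tail)
  let counts := pairs.foldl (fun counts pair =>
      counts.insert pair (counts.getD pair 0 + 1)) PySem.Dict.empty
  let transitions := counts.items.foldl (fun transitions kv =>
      let transitions := transitions.setdefault kv.1.1 PySem.Dict.empty
      transitions.insert kv.1.1
        ((transitions.getD kv.1.1 PySem.Dict.empty).insert kv.1.2 kv.2)) PySem.Dict.empty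
  transitions.items.map (fun kv => (kv.1, kv.2.items))

-- ===== PRECONDITION & SPEC =====
def Spec_count_transitions_py (chains : List (List String)) (out : List (String × List (String × Int))) : Prop := out = count_transitions_py_alt chains
instance (chains : List (List String)) (out : List (String × List (String × Int))) : Decidable (Spec_count_transitions_py chains out) := by unfold Spec_count_transitions_py; infer_instance

-- ===== CLAIM (what is proved, stated in full; the proofs are below) =====
def Claim_equal_count_transitions_py : Prop := ∀ (chains : List (List String)), Dom_count_transitions_py chains → Spec_count_transitions_py chains (count_transitions_py chains)

-- ===== LEMMAS AND PROOFS =====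

def pvAStep (t : PySem.Dict String (PySem.Dict String Int)) (p : String × String) :
    PySem.Dict String (PySem.Dict String Int) :=
  let t := if t.contains p.1 then t else t.insert p.1 PySem.Dict.empty
  let inner := t.getD p.1 PySem.Dict.empty
  let inner := if inner.contains p.2 then inner else inner.insert p.2 0
  let inner := inner.insert p.2 (inner.getD p.2 0 + 1)
  t.insert p.1 inner

def pvInner (ps : List (String × String)) (s : String) : List (String × Int) :=
  (PySem.Set.ofList ((ps.filter (fun p => p.1 == s)).map (fun p => p.2))).map
    (fun e => (e, (ps.count (s, e) : Int)))

def pvOuter (ps : List (String × String)) : List (String × PySem.Dict String Int) :=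
  (PySem.Set.ofList (ps.map (fun p => p.1))).map (fun s => (s, PySem.Dict.mk (pvInner ps s)))

-- membership bridges
theorem pvMemStarts (ps : List (String × String)) (s : String) :
    s ∈ PySem.Set.ofList (ps.map (fun p => p.1)) ↔ ∃ e, (s, e) ∈ ps := by
  rw [PySem.Set.mem_ofList]
  simp only [List.mem_map]
  constructor
  · rintro ⟨⟨a, b⟩, hb, rfl⟩; exact ⟨b, hb⟩
  · rintro ⟨e, he⟩; exact ⟨(s, e), he, rfl⟩

theorem pvMemEnds (ps : List (String × String)) (s e : String) :
    e ∈ PySem.Set.ofList ((ps.filter (fun p => p.1 == s)).map (fun p => p.2)) ↔ (s, e) ∈ ps := by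
  rw [PySem.Set.mem_ofList]
  simp only [List.mem_map, List.mem_filter, beq_iff_eq]
  constructor
  · rintro ⟨⟨a, b⟩, ⟨hb, rfl⟩, rfl⟩; exact hb
  · intro h; exact ⟨(s, e), ⟨h, rfl⟩, rfl⟩

theorem pvKeysOuter (ps : List (String × String)) :
    (PySem.Dict.mk (pvOuter ps)).keys = PySem.Set.ofList (ps.map (fun p => p.1)) := by
  simp [pvOuter, PySem.Dict.keys_mk, List.map_map, Function.comp_def]

theorem pvKeysInner (ps : List (String × String)) (s : String) :
    (PySem.Dict.mk (pvInner ps s)).keys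
      = PySem.Set.ofList ((ps.filter (fun p => p.1 == s)).map (fun p => p.2)) := by
  simp [pvInner, PySem.Dict.keys_mk, List.map_map, Function.comp_def]

theorem pvGetDOuter (ps : List (String × String)) (s : String)
    (h : s ∈ PySem.Set.ofList (ps.map (fun p => p.1))) :
    (PySem.Dict.mk (pvOuter ps)).getD s PySem.Dict.empty = PySem.Dict.mk (pvInner ps s) := by
  apply PySem.Dict.getD_of_mem_items
  · show (s, PySem.Dict.mk (pvInner ps s)) ∈ pvOuter ps
    exact List.mem_map.mpr ⟨s, h, rfl⟩
  · rw [pvKeysOuter]; exact PySem.Set.nodup_ofList _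


theorem pvCountAppendNe (ps : List (String × String)) (q p : String × String) (h : q ≠ p) :
    List.count q (ps ++ [p]) = List.count q ps := by
  rw [List.count_append, List.count_singleton]
  simp [beq_iff_eq]
  exact fun hh => h hh.symm

theorem pvInnerAppendNe (ps : List (String × String)) (s e s' : String) (h : s' ≠ s) :
    pvInner (ps ++ [(s, e)]) s' = pvInner ps s' := by
  unfold pvInner
  have hf : List.filter (fun p => p.1 == s') (ps ++ [(s, e)])
      = List.filter (fun p => p.1 == s') ps := by
    simp [List.filter_append, h.symm]
  rw [hf]
  refine List.map_congr_left ?_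
  intro e' _
  rw [pvCountAppendNe ps _ _ (by intro hc; exact h (congrArg Prod.fst hc))]

theorem pvInnerAppendNew (ps : List (String × String)) (s e : String) (h : (s, e) ∉ ps) :
    pvInner (ps ++ [(s, e)]) s = pvInner ps s ++ [(e, 1)] := by
  unfold pvInner
  have hf : List.filter (fun p => p.1 == s) (ps ++ [(s, e)])
      = List.filter (fun p => p.1 == s) ps ++ [(s, e)] := by
    simp [List.filter_append]
  rw [hf, List.map_append]
  simp only [List.map_cons, List.map_nil]
  rw [PySem.Set.ofList_append, PySem.Set.update_cons, PySem.Set.update_nil]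
  have he : e ∉ PySem.Set.ofList ((ps.filter (fun p => p.1 == s)).map (fun p => p.2)) := by
    rw [pvMemEnds]; exact h
  have hadd : (PySem.Set.ofList ((ps.filter (fun p => p.1 == s)).map (fun p => p.2))).add e
      = PySem.Set.ofList ((ps.filter (fun p => p.1 == s)).map (fun p => p.2)) ++ [e] := by
    simp [PySem.Set.add, he]
  rw [hadd, List.map_append]
  congr 1
  · refine List.map_congr_left ?_
    intro e' he'
    have hne : e' ≠ e := fun hh => he (hh ▸ he')
    rw [pvCountAppendNe ps _ _ (by intro hc; exact hne (congrArg Prod.snd hc))]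
  · have hc1 : List.count (s, e) (ps ++ [(s, e)]) = 1 := by
      rw [List.count_append, List.count_eq_zero.mpr h]
      simp
    simp only [List.map_cons, List.map_nil, hc1, Nat.cast_one]

theorem pvInnerAppendOld (ps : List (String × String)) (s e : String) (h : (s, e) ∈ ps) :
    pvInner (ps ++ [(s, e)]) s
      = (pvInner ps s).map (fun q => if q.1 == e then (e, (ps.count (s, e) : Int) + 1) else q) := by
  unfold pvInner
  have hf : List.filter (fun p => p.1 == s) (ps ++ [(s, e)])
      = List.filter (fun p => p.1 == s) ps ++ [(s, e)] := by
    simp [List.filter_append]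
  rw [hf, List.map_append]
  simp only [List.map_cons, List.map_nil]
  rw [PySem.Set.ofList_append, PySem.Set.update_cons, PySem.Set.update_nil]
  have he : e ∈ PySem.Set.ofList ((ps.filter (fun p => p.1 == s)).map (fun p => p.2)) := by
    rw [pvMemEnds]; exact h
  have hadd : (PySem.Set.ofList ((ps.filter (fun p => p.1 == s)).map (fun p => p.2))).add e
      = PySem.Set.ofList ((ps.filter (fun p => p.1 == s)).map (fun p => p.2)) := by
    simp [PySem.Set.add, he]
  rw [hadd, List.map_map]
  refine List.map_congr_left ?_
  intro e' _
  by_cases hee : e' = e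
  · subst hee
    have hc : List.count (s, e') (ps ++ [(s, e')]) = List.count (s, e') ps + 1 := by
      simp [List.count_append]
    simp [hc, Function.comp]
  · rw [pvCountAppendNe ps _ _ (by intro hc; exact hee (congrArg Prod.snd hc))]
    simp [Function.comp, hee]

theorem pvStartsAppend (ps : List (String × String)) (s e : String) :
    PySem.Set.ofList ((ps ++ [(s, e)]).map (fun p => p.1))
      = (PySem.Set.ofList (ps.map (fun p => p.1))).add s := by
  rw [List.map_append]
  simp only [List.map_cons, List.map_nil]
  rw [PySem.Set.ofList_append, PySem.Set.update_cons, PySem.Set.update_nil]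

theorem pvInnerNotStart (ps : List (String × String)) (s : String)
    (h : ∀ e, (s, e) ∉ ps) : pvInner ps s = [] := by
  unfold pvInner
  have : List.filter (fun p => p.1 == s) ps = [] := by
    rw [List.filter_eq_nil_iff]
    rintro ⟨a, b⟩ hab hq
    exact h b (by simpa using (beq_iff_eq.mp hq ▸ hab))
  simp [this]

theorem pvStep (ps : List (String × String)) (s e : String) :
    pvAStep (PySem.Dict.mk (pvOuter ps)) (s, e) = PySem.Dict.mk (pvOuter (ps ++ [(s, e)])) := by
  have hkeys := pvKeysOuter ps
  have hnodup : (PySem.Dict.mk (pvOuter ps)).keys.Nodup := by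
    rw [hkeys]; exact PySem.Set.nodup_ofList _
  have hcont : (PySem.Dict.mk (pvOuter ps)).contains s
      = decide (s ∈ PySem.Set.ofList (ps.map (fun p => p.1))) := by
    rw [PySem.Dict.contains_eq_decide_mem_keys, hkeys]
  by_cases hs : s ∈ PySem.Set.ofList (ps.map (fun p => p.1))
  · have hcont' : (PySem.Dict.mk (pvOuter ps)).contains s = true := by simp [hcont, hs]
    have hinner := pvGetDOuter ps s hs
    have hkinner := pvKeysInner ps s
    have hcontInner : (PySem.Dict.mk (pvInner ps s)).contains e
        = decide (e ∈ PySem.Set.ofList ((ps.filter (fun p => p.1 == s)).map (fun p => p.2))) := by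
      rw [PySem.Dict.contains_eq_decide_mem_keys, hkinner]
    have hadd : (PySem.Set.ofList (ps.map (fun p => p.1))).add s
        = PySem.Set.ofList (ps.map (fun p => p.1)) := by simp [PySem.Set.add, hs]
    by_cases hee : e ∈ PySem.Set.ofList ((ps.filter (fun p => p.1 == s)).map (fun p => p.2))
    · have hmem : (s, e) ∈ ps := (pvMemEnds ps s e).mp hee
      have hcontInner' : (PySem.Dict.mk (pvInner ps s)).contains e = true := by
        simp [hcontInner, hee]
      have hninner : (PySem.Dict.mk (pvInner ps s)).keys.Nodup := by
        rw [hkinner]; exact PySem.Set.nodup_ofList _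
      have hgetd : (PySem.Dict.mk (pvInner ps s)).getD e 0 = (ps.count (s, e) : Int) := by
        apply PySem.Dict.getD_of_mem_items _ _ hninner
        show (e, (ps.count (s, e) : Int)) ∈ pvInner ps s
        exact List.mem_map.mpr ⟨e, hee, rfl⟩
      simp only [pvAStep, hcont', if_true, hinner, hcontInner', hgetd]
      apply PySem.Dict.ext
      rw [PySem.Dict.items_insert_of_contains _ _ hcont']
      show (pvOuter ps).map _ = pvOuter (ps ++ [(s, e)])
      conv_rhs => unfold pvOuter
      rw [pvStartsAppend, hadd]
      unfold pvOuter
      rw [List.map_map]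
      refine List.map_congr_left ?_
      intro s' _
      by_cases hss : s' = s
      · subst hss
        simp only [Function.comp, beq_self_eq_true, if_true, Prod.mk.injEq, true_and]
        rw [pvInnerAppendOld ps s' e hmem]
        apply PySem.Dict.ext
        rw [PySem.Dict.items_insert_of_contains _ _ hcontInner']
      · simp only [Function.comp, beq_iff_eq, hss, if_false]
        rw [pvInnerAppendNe ps s e s' hss]
    · have hmem : (s, e) ∉ ps := fun hc => hee ((pvMemEnds ps s e).mpr hc)
      have hcontInner' : (PySem.Dict.mk (pvInner ps s)).contains e = false := by
        simp [hcontInner, hee]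
      simp only [pvAStep, hcont', if_true, hinner, hcontInner', Bool.false_eq_true, if_false,
        PySem.Dict.getD_insert_self, PySem.Dict.insert_insert_self]
      apply PySem.Dict.ext
      rw [PySem.Dict.items_insert_of_contains _ _ hcont']
      show (pvOuter ps).map _ = pvOuter (ps ++ [(s, e)])
      conv_rhs => unfold pvOuter
      rw [pvStartsAppend, hadd]
      unfold pvOuter
      rw [List.map_map]
      refine List.map_congr_left ?_
      intro s' _
      by_cases hss : s' = s
      · subst hss
        simp only [Function.comp, beq_self_eq_true, if_true, Prod.mk.injEq, true_and]
        rw [pvInnerAppendNew ps s' e hmem]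
        apply PySem.Dict.ext
        rw [PySem.Dict.items_insert_of_not_contains _ _ hcontInner']
        rfl
      · simp only [Function.comp, beq_iff_eq, hss, if_false]
        rw [pvInnerAppendNe ps s e s' hss]
  · have hcont' : (PySem.Dict.mk (pvOuter ps)).contains s = false := by simp [hcont, hs]
    have hnot : ∀ e', (s, e') ∉ ps := by
      intro e' hc
      exact hs ((pvMemStarts ps s).mpr ⟨e', hc⟩)
    simp only [pvAStep, hcont', Bool.false_eq_true, if_false, PySem.Dict.getD_insert_self,
      PySem.Dict.contains_empty, PySem.Dict.insert_insert_self]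
    apply PySem.Dict.ext
    rw [PySem.Dict.items_insert_of_not_contains _ _ hcont']
    show pvOuter ps ++ [(s, _)] = pvOuter (ps ++ [(s, e)])
    conv_rhs => unfold pvOuter
    rw [pvStartsAppend]
    have hadd : (PySem.Set.ofList (ps.map (fun p => p.1))).add s
        = PySem.Set.ofList (ps.map (fun p => p.1)) ++ [s] := by simp [PySem.Set.add, hs]
    rw [hadd, List.map_append]
    congr 1
    · conv_lhs => unfold pvOuter
      refine (List.map_congr_left ?_).symm
      intro s' hs'
      have hss : s' ≠ s := fun hh => hs (hh ▸ hs')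
      rw [pvInnerAppendNe ps s e s' hss]
    · simp only [List.map_cons, List.map_nil]
      refine congrArg (fun d => [(s, d)]) ?_
      rw [pvInnerAppendNew ps s e (hnot e), pvInnerNotStart ps s hnot]
      apply PySem.Dict.ext
      rfl

theorem pvMain (ps : List (String × String)) :
    ps.foldl pvAStep PySem.Dict.empty = PySem.Dict.mk (pvOuter ps) := by
  induction ps using List.reverseRecOn with
  | nil => rfl
  | append_singleton ps p ih =>
    rw [List.foldl_append, ih]
    cases p with
    | mk s e => exact pvStep ps s e

theorem pvOfListAppendSingleton {α : Type} [BEq α] (l : List α) (x : α) :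
    PySem.Set.ofList (l ++ [x]) = (PySem.Set.ofList l).add x := by
  rw [PySem.Set.ofList_append, PySem.Set.update_cons, PySem.Set.update_nil]

theorem pvSetFilter (l : List (String × String)) (q : String × String → Bool) :
    (PySem.Set.ofList l).filter q = PySem.Set.ofList (l.filter q) := by
  induction l using List.reverseRecOn with
  | nil => rfl
  | append_singleton l x ih =>
    rw [pvOfListAppendSingleton, List.filter_append]
    by_cases hx : x ∈ l
    · have h1 : x ∈ PySem.Set.ofList l := (PySem.Set.mem_ofList l x).mpr hx
      have h2 : (PySem.Set.ofList l).add x = PySem.Set.ofList l := by simp [PySem.Set.add, h1]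
      rw [h2, ih]
      by_cases hq : q x = true
      · have : List.filter q [x] = [x] := by simp [hq]
        rw [this, pvOfListAppendSingleton]
        have h3 : x ∈ PySem.Set.ofList (l.filter q) := by
          rw [PySem.Set.mem_ofList]; exact List.mem_filter.mpr ⟨hx, hq⟩
        simp [PySem.Set.add, h3]
      · have : List.filter q [x] = [] := by
          simp only [List.filter, Bool.not_eq_true] at *
          simp [hq]
        rw [this, List.append_nil]
    · have h1 : x ∉ PySem.Set.ofList l := fun hc => hx ((PySem.Set.mem_ofList l x).mp hc)
      have h2 : (PySem.Set.ofList l).add x = PySem.Set.ofList l ++ [x] := by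
        simp [PySem.Set.add, h1]
      rw [h2, List.filter_append, ih]
      by_cases hq : q x = true
      · have hfx : List.filter q [x] = [x] := by simp [hq]
        rw [hfx, pvOfListAppendSingleton]
        have h3 : x ∉ PySem.Set.ofList (l.filter q) := by
          rw [PySem.Set.mem_ofList]
          exact fun hc => hx (List.mem_filter.mp hc).1
        simp [PySem.Set.add, h3]
      · have hfx : List.filter q [x] = [] := by
          simp only [List.filter, Bool.not_eq_true] at *
          simp [hq]
        rw [hfx, List.append_nil, List.append_nil]

theorem pvSetMapOfList (l : List (String × String)) (f : String × String → String) :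
    PySem.Set.ofList ((PySem.Set.ofList l).map f) = PySem.Set.ofList (l.map f) := by
  induction l using List.reverseRecOn with
  | nil => rfl
  | append_singleton l x ih =>
    rw [pvOfListAppendSingleton, List.map_append]
    by_cases hx : x ∈ l
    · have h1 : x ∈ PySem.Set.ofList l := (PySem.Set.mem_ofList l x).mpr hx
      have h2 : (PySem.Set.ofList l).add x = PySem.Set.ofList l := by simp [PySem.Set.add, h1]
      rw [h2, ih]
      simp only [List.map_cons, List.map_nil]
      rw [pvOfListAppendSingleton]
      have h3 : f x ∈ PySem.Set.ofList (l.map f) := by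
        rw [PySem.Set.mem_ofList]; exact List.mem_map.mpr ⟨x, hx, rfl⟩
      simp [PySem.Set.add, h3]
    · have h1 : x ∉ PySem.Set.ofList l := fun hc => hx ((PySem.Set.mem_ofList l x).mp hc)
      have h2 : (PySem.Set.ofList l).add x = PySem.Set.ofList l ++ [x] := by
        simp [PySem.Set.add, h1]
      rw [h2, List.map_append]
      simp only [List.map_cons, List.map_nil]
      rw [pvOfListAppendSingleton, pvOfListAppendSingleton, ih]

theorem pvSetMapSnd (s : String) (l : List (String × String)) (h : ∀ p ∈ l, p.1 = s) :
    (PySem.Set.ofList l).map (fun p => p.2) = PySem.Set.ofList (l.map (fun p => p.2)) := by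
  induction l using List.reverseRecOn with
  | nil => rfl
  | append_singleton l x ih =>
    have hl : ∀ p ∈ l, p.1 = s := fun p hp => h p (List.mem_append_left _ hp)
    have hx1 : x.1 = s := h x (List.mem_append_right _ (List.mem_singleton_self x))
    rw [pvOfListAppendSingleton, List.map_append]
    simp only [List.map_cons, List.map_nil]
    rw [pvOfListAppendSingleton]
    by_cases hx : x ∈ l
    · have h1 : x ∈ PySem.Set.ofList l := (PySem.Set.mem_ofList l x).mpr hx
      have h2 : (PySem.Set.ofList l).add x = PySem.Set.ofList l := by simp [PySem.Set.add, h1]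
      have h3 : x.2 ∈ PySem.Set.ofList (l.map (fun p => p.2)) := by
        rw [PySem.Set.mem_ofList]; exact List.mem_map.mpr ⟨x, hx, rfl⟩
      rw [h2, ih hl]
      simp [PySem.Set.add, h3]
    · have h1 : x ∉ PySem.Set.ofList l := fun hc => hx ((PySem.Set.mem_ofList l x).mp hc)
      have h2 : (PySem.Set.ofList l).add x = PySem.Set.ofList l ++ [x] := by
        simp [PySem.Set.add, h1]
      have h3 : x.2 ∉ PySem.Set.ofList (l.map (fun p => p.2)) := by
        rw [PySem.Set.mem_ofList]
        rintro hc
        obtain ⟨q, hq, hq2⟩ := List.mem_map.mp hc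
        have : q = x := Prod.ext ((hl q hq).trans hx1.symm) hq2
        exact hx (this ▸ hq)
      rw [h2, List.map_append, ih hl]
      simp [PySem.Set.add, h3]

def pvBStep (t : PySem.Dict String (PySem.Dict String Int))
    (kv : (String × String) × Int) : PySem.Dict String (PySem.Dict String Int) :=
  let t := t.setdefault kv.1.1 PySem.Dict.empty
  t.insert kv.1.1 ((t.getD kv.1.1 PySem.Dict.empty).insert kv.1.2 kv.2)

def pvGroup (L : List ((String × String) × Int)) : List (String × PySem.Dict String Int) :=
  (PySem.Set.ofList (L.map (fun q => q.1.1))).map (fun s =>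
    (s, PySem.Dict.mk ((L.filter (fun q => q.1.1 == s)).map (fun q => (q.1.2, q.2)))))

theorem pvGroupKeys (L : List ((String × String) × Int)) :
    (PySem.Dict.mk (pvGroup L)).keys = PySem.Set.ofList (L.map (fun q => q.1.1)) := by
  simp [pvGroup, PySem.Dict.keys_mk, List.map_map, Function.comp_def]

theorem pvGroupGetD (L : List ((String × String) × Int)) (s : String)
    (h : s ∈ PySem.Set.ofList (L.map (fun q => q.1.1))) :
    (PySem.Dict.mk (pvGroup L)).getD s PySem.Dict.empty
      = PySem.Dict.mk ((L.filter (fun q => q.1.1 == s)).map (fun q => (q.1.2, q.2))) := by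
  apply PySem.Dict.getD_of_mem_items
  · show (s, _) ∈ pvGroup L
    exact List.mem_map.mpr ⟨s, h, rfl⟩
  · rw [pvGroupKeys]; exact PySem.Set.nodup_ofList _

theorem pvGroupStep (L : List ((String × String) × Int)) (s e : String) (c : Int)
    (hfresh : (s, e) ∉ L.map (fun q => q.1)) :
    pvBStep (PySem.Dict.mk (pvGroup L)) ((s, e), c)
      = PySem.Dict.mk (pvGroup (L ++ [((s, e), c)])) := by
  have hcont : (PySem.Dict.mk (pvGroup L)).contains s
      = decide (s ∈ PySem.Set.ofList (L.map (fun q => q.1.1))) := by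
    rw [PySem.Dict.contains_eq_decide_mem_keys, pvGroupKeys]
  have hstarts : PySem.Set.ofList ((L ++ [((s, e), c)]).map (fun q => q.1.1))
      = (PySem.Set.ofList (L.map (fun q => q.1.1))).add s := by
    rw [List.map_append]
    simp only [List.map_cons, List.map_nil]
    exact pvOfListAppendSingleton _ _
  by_cases hs : s ∈ PySem.Set.ofList (L.map (fun q => q.1.1))
  · have hcont' : (PySem.Dict.mk (pvGroup L)).contains s = true := by simp [hcont, hs]
    have hsd : (PySem.Dict.mk (pvGroup L)).setdefault s PySem.Dict.empty
        = PySem.Dict.mk (pvGroup L) := PySem.Dict.setdefault_of_contains _ _ hcont'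
    have hinner := pvGroupGetD L s hs
    have hcontInner :
        (PySem.Dict.mk ((L.filter (fun q => q.1.1 == s)).map (fun q => (q.1.2, q.2)))).contains e
          = false := by
      rw [PySem.Dict.contains_eq_decide_mem_keys, PySem.Dict.keys_mk, List.map_map]
      simp only [decide_eq_false_iff_not]
      intro hc
      obtain ⟨q, hq, hq2⟩ := List.mem_map.mp hc
      have hq3 := List.mem_filter.mp hq
      apply hfresh
      refine List.mem_map.mpr ⟨q, hq3.1, ?_⟩
      have : q.1.1 = s := beq_iff_eq.mp hq3.2
      exact Prod.ext this hq2
    simp only [pvBStep, hsd, hinner]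
    apply PySem.Dict.ext
    rw [PySem.Dict.items_insert_of_contains _ _ hcont']
    show (pvGroup L).map _ = pvGroup (L ++ [((s, e), c)])
    conv_rhs => unfold pvGroup
    rw [hstarts]
    have hadd : (PySem.Set.ofList (L.map (fun q => q.1.1))).add s
        = PySem.Set.ofList (L.map (fun q => q.1.1)) := by simp [PySem.Set.add, hs]
    rw [hadd]
    unfold pvGroup
    rw [List.map_map]
    refine List.map_congr_left ?_
    intro s' _
    by_cases hss : s' = s
    · subst hss
      simp only [Function.comp, beq_self_eq_true, if_true, Prod.mk.injEq, true_and]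
      apply PySem.Dict.ext
      rw [PySem.Dict.items_insert_of_not_contains _ _ hcontInner]
      show _ ++ [(e, c)] = ((L ++ [((s', e), c)]).filter _).map _
      rw [List.filter_append]
      have : List.filter (fun q => q.1.1 == s') [((s', e), c)] = [((s', e), c)] := by simp
      rw [this, List.map_append]
      rfl
    · simp only [Function.comp, beq_iff_eq, hss, if_false, Prod.mk.injEq, true_and]
      rw [List.filter_append]
      have : List.filter (fun q => q.1.1 == s') [((s, e), c)] = [] := by
        simp [Ne.symm hss]
      rw [this, List.append_nil]
  · have hcont' : (PySem.Dict.mk (pvGroup L)).contains s = false := by simp [hcont, hs]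
    have hsd : (PySem.Dict.mk (pvGroup L)).setdefault s PySem.Dict.empty
        = (PySem.Dict.mk (pvGroup L)).insert s PySem.Dict.empty :=
      PySem.Dict.setdefault_of_not_contains _ _ hcont'
    simp only [pvBStep, hsd, PySem.Dict.getD_insert_self, PySem.Dict.insert_insert_self]
    apply PySem.Dict.ext
    rw [PySem.Dict.items_insert_of_not_contains _ _ hcont']
    show pvGroup L ++ [(s, _)] = pvGroup (L ++ [((s, e), c)])
    conv_rhs => unfold pvGroup
    rw [hstarts]
    have hadd : (PySem.Set.ofList (L.map (fun q => q.1.1))).add s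
        = PySem.Set.ofList (L.map (fun q => q.1.1)) ++ [s] := by simp [PySem.Set.add, hs]
    rw [hadd, List.map_append]
    congr 1
    · conv_lhs => unfold pvGroup
      refine (List.map_congr_left ?_).symm
      intro s' hs'
      have hss : s' ≠ s := fun hh => hs (hh ▸ hs')
      rw [List.filter_append]
      have : List.filter (fun q => q.1.1 == s') [((s, e), c)] = [] := by
        simp [Ne.symm hss]
      rw [this, List.append_nil]
    · simp only [List.map_cons, List.map_nil]
      refine congrArg (fun d => [(s, d)]) ?_
      apply PySem.Dict.ext
      show (PySem.Dict.empty.insert e c).items = _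
      rw [PySem.Dict.items_insert_of_not_contains _ _ (PySem.Dict.contains_empty e)]
      rw [List.filter_append]
      have h4 : List.filter (fun q => q.1.1 == s) L = [] := by
        rw [List.filter_eq_nil_iff]
        intro q hq hq2
        exact hs ((PySem.Set.mem_ofList _ _).mpr
          (List.mem_map.mpr ⟨q, hq, beq_iff_eq.mp hq2⟩))
      have h5 : List.filter (fun q => q.1.1 == s) [((s, e), c)] = [((s, e), c)] := by simp
      rw [h4, h5]
      rfl

theorem pvGroupFold (L : List ((String × String) × Int)) (hnd : (L.map (fun q => q.1)).Nodup) :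
    L.foldl pvBStep PySem.Dict.empty = PySem.Dict.mk (pvGroup L) := by
  induction L using List.reverseRecOn with
  | nil => rfl
  | append_singleton L kv ih =>
    rw [List.map_append] at hnd
    have hnd' := (List.nodup_append.mp hnd)
    rw [List.foldl_append, ih hnd'.1]
    obtain ⟨⟨s, e⟩, c⟩ := kv
    apply pvGroupStep
    intro hc
    exact hnd'.2.2 (s, e) hc (s, e) (List.mem_singleton.mpr rfl) rfl

theorem pvGroupCanon (ps : List (String × String)) :
    pvGroup ((PySem.Set.ofList ps).map (fun k => (k, (ps.count k : Int)))) = pvOuter ps := by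
  unfold pvGroup pvOuter
  have hstarts : PySem.Set.ofList
        (((PySem.Set.ofList ps).map (fun k => (k, (ps.count k : Int)))).map (fun q => q.1.1))
      = PySem.Set.ofList (ps.map (fun p => p.1)) := by
    rw [List.map_map]
    exact pvSetMapOfList ps _
  rw [hstarts]
  refine List.map_congr_left ?_
  intro s _
  refine congrArg (fun d => (s, PySem.Dict.mk d)) ?_
  rw [List.filter_map, List.map_map]
  have hfilt : (PySem.Set.ofList ps).filter (fun k => k.1 == s)
      = PySem.Set.ofList (ps.filter (fun p => p.1 == s)) := pvSetFilter ps _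
  show ((PySem.Set.ofList ps).filter (fun k => k.1 == s)).map _ = _
  rw [hfilt]
  have hall : ∀ p ∈ ps.filter (fun p => p.1 == s), p.1 = s := by
    intro p hp
    exact beq_iff_eq.mp (List.mem_filter.mp hp).2
  calc (PySem.Set.ofList (ps.filter (fun p => p.1 == s))).map
        (fun k => ((k, (ps.count k : Int)).1.2, (k, (ps.count k : Int)).2))
      = (PySem.Set.ofList (ps.filter (fun p => p.1 == s))).map
        ((fun e => (e, (ps.count (s, e) : Int))) ∘ (fun p => p.2)) := by
        refine List.map_congr_left ?_
        intro k hk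
        have hk1 : k.1 = s := hall k ((PySem.Set.mem_ofList _ _).mp hk)
        simp only [Function.comp]
        rw [show (s, k.2) = k from Prod.ext hk1.symm rfl]
    _ = ((PySem.Set.ofList (ps.filter (fun p => p.1 == s))).map (fun p => p.2)).map
        (fun e => (e, (ps.count (s, e) : Int))) := by rw [List.map_map]
    _ = (PySem.Set.ofList ((ps.filter (fun p => p.1 == s)).map (fun p => p.2))).map
        (fun e => (e, (ps.count (s, e) : Int))) := by
        rw [pvSetMapSnd s _ hall]

theorem pvZ : ∀ (c : List String),
    (List.range (c.length - 1)).map (fun k => (c.getD k "", c.getD (k+1) "")) = c.zip c.tail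
  | [] => rfl
  | [_] => rfl
  | x :: y :: r => by
    have ih := pvZ (y :: r)
    simp only [List.length_cons, Nat.add_sub_cancel] at ih ⊢
    rw [List.range_succ_eq_map]
    simp only [List.map_cons, List.map_map, List.zip_cons_cons, List.tail_cons]
    refine congrArg _ ?_
    simpa [Function.comp] using ih

theorem pvPairs (chain : List String) :
    (PySem.List.pyRange 0 (PySem.List.len chain - 1)).map
      (fun i => (PySem.List.pyGetD chain i "", PySem.List.pyGetD chain (i + 1) ""))
    = chain.zip chain.tail := by
  cases chain with
  | nil => rfl
  | cons x r =>
    have h1 : PySem.List.len (x :: r) - 1 = ((r.length : Nat) : Int) := by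
      simp [PySem.List.len_eq]
    rw [h1, PySem.List.pyRange_zero_natCast, List.map_map]
    have hz := pvZ (x :: r)
    simp only [List.length_cons, Nat.add_sub_cancel] at hz
    rw [← hz]
    refine List.map_congr_left ?_
    intro k _
    have h2 : ((k : Int) + 1) = ((k + 1 : Nat) : Int) := by push_cast; ring
    simp only [Function.comp, h2, PySem.List.pyGetD_natCast]

theorem pvRangeLoop (chain : List String) (t : PySem.Dict String (PySem.Dict String Int)) :
    (PySem.List.pyRange 0 (PySem.List.len chain - 1)).foldl (fun t i =>
        let start := PySem.List.pyGetD chain i ""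
        let stop := PySem.List.pyGetD chain (i + 1) ""
        let t := if t.contains start then t else t.insert start PySem.Dict.empty
        let inner := t.getD start PySem.Dict.empty
        let inner := if inner.contains stop then inner else inner.insert stop 0
        let inner := inner.insert stop (inner.getD stop 0 + 1)
        t.insert start inner) t
    = (chain.zip chain.tail).foldl pvAStep t := by
  rw [← pvPairs chain, List.foldl_map]
  rfl

-- ===== VERDICT (by name: the statement is the Claim_ definition above) =====
theorem count_transitions_py_spec : Claim_equal_count_transitions_py := by
  intro chains _
  show _ = _
  unfold count_transitions_py count_transitions_py_alt
  simp only [pvRangeLoop, ← List.foldl_flatMap, pvMain,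
    PySem.Dict.foldl_insert_getD_add_one_eq_counter, PySem.Dict.items_counter]
  rw [show (fun (t : PySem.Dict String (PySem.Dict String Int))
        (kv : (String × String) × Int) =>
        let t := t.setdefault kv.1.1 PySem.Dict.empty
        t.insert kv.1.1 ((t.getD kv.1.1 PySem.Dict.empty).insert kv.1.2 kv.2)) = pvBStep from rfl]
  rw [pvGroupFold _ (by
    rw [List.map_map]
    simp [Function.comp_def, PySem.Set.nodup_ofList])]
  rw [pvGroupCanon]
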